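-- pv_equiv track=rewrite | github.com/KakaoFarm/CoteKing | Tests/2021 KAKAO 추천팀 겨울인턴/4.py | check
-- ===== SOURCE A (Python) =====
-- def plus(x, nums, n):
--     while x < n:
--         if nums[x+1]:
--             return x+1
--         else: x += 1
--     return n
--
-- def check(arr, k):
--     n = len(arr)
--     nums = [True]*n
--     i = 0
--     j = 1
--     count = 0
--     while j < n:
--         if arr[j] - arr[i] < k:
--             nums[j] = False
--             count += 1
--         else:
--             i = plus(i, nums, n)
--         j += 1
--     return count
-- ===== SOURCE B (Python) =====
-- def check(arr, k):
--     count = 0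
--     last = 0
--     for j in range(1, len(arr)):
--         if arr[j] - arr[last] < k:
--             count += 1
--         else:
--             last = j
--     return count
-- ===== Notes on version B (the rewrite author's own statement) =====
-- stated objective: simpler
-- what changed: Replaces A's boolean marker array and the `plus` helper's forward scan for the next unmarked index by a single tracked index of the last kept element, turning the loop body into pure O(1) work with no auxiliary array.
import Mathlib
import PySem

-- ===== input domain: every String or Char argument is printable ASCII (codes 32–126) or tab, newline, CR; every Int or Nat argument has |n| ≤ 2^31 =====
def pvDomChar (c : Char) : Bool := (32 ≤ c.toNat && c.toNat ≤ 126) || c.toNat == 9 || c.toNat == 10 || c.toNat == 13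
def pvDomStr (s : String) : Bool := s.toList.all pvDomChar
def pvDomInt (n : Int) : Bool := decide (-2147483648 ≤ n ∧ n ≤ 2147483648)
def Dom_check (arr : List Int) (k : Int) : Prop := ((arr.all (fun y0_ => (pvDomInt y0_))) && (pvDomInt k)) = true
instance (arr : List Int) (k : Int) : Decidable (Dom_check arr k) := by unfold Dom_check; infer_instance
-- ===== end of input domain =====

-- B replaces A's boolean marker array and the `plus` forward scan by a single
-- tracked index of the last kept element (objective: simpler, same result).

-- ===== PORT A =====
-- `plus`: scan forward from x for the next index whose marker is still True.
-- (Python would raise IndexError on nums[x+1] when x+1 = n; on the calls `check`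
-- makes this never happens — the `none` arm mirrors that unreachable raise by n.)
def plusA (x : Int) (nums : List Bool) (n : Int) : Int :=
  if _h : x < n then
    match PySem.List.pyGet? nums (x + 1) with
    | some true => x + 1
    | some false => plusA (x + 1) nums n
    | none => n
  else n
termination_by (n - x).toNat
decreasing_by omega

-- the while loop of `check`; arr[j], arr[i] are always in range (0 ≤ i < j < n),
-- so pyGetD is exact here
def checkLoopA (arr : List Int) (k n : Int) (nums : List Bool) (i j count : Int) : Int :=
  if _h : j < n then
    if PySem.List.pyGetD arr j 0 - PySem.List.pyGetD arr i 0 < k then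
      checkLoopA arr k n (PySem.List.pySetD nums j false) i (j + 1) (count + 1)
    else
      checkLoopA arr k n nums (plusA i nums n) (j + 1) count
  else count
termination_by (n - j).toNat
decreasing_by all_goals omega

def check (arr : List Int) (k : Int) : Int :=
  checkLoopA arr k (arr.length : Int) (List.replicate arr.length true) 0 1 0

-- ===== PORT B =====
def check_alt (arr : List Int) (k : Int) : Int :=
  ((PySem.List.pyRange 1 (arr.length : Int) 1).foldl
    (fun s j =>
      if PySem.List.pyGetD arr j 0 - PySem.List.pyGetD arr s.1 0 < k then (s.1, s.2 + 1)
      else (j, s.2))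
    ((0 : Int), (0 : Int))).2

-- ===== PRECONDITION & SPEC =====
def Spec_check (arr : List Int) (k : Int) (out : Int) : Prop := out = check_alt arr k
instance (arr : List Int) (k : Int) (out : Int) : Decidable (Spec_check arr k out) := by unfold Spec_check; infer_instance

-- ===== CLAIM (what is proved, stated in full; the proofs are below) =====
def Claim_equal_check : Prop := ∀ (arr : List Int) (k : Int), Dom_check arr k → Spec_check arr k (check arr k)

-- ===== LEMMAS AND PROOFS =====

-- `plus` returns the first still-True index after x; when all markers strictly
-- between x and j are False and nums[j] is True, that index is j.
lemma plusA_eq (nums : List Bool) (n : Int) (j : Int)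
    (hjn : j < n)
    (htrue : PySem.List.pyGet? nums j = some true) :
    ∀ x : Int, x < j →
      (∀ m : Int, x < m → m < j → PySem.List.pyGet? nums m = some false) →
      plusA x nums n = j := by
  intro x
  induction hF : (j - x).toNat generalizing x with
  | zero => intro hxj _; omega
  | succ f ih =>
    intro hxj hfalse
    rw [plusA]
    have hxn : x < n := by omega
    simp only [hxn, dif_pos]
    by_cases hxe : x + 1 = j
    · rw [hxe, htrue]
    · have h1 : x + 1 < j := by omega
      rw [hfalse (x + 1) (by omega) h1]
      exact ih (x + 1) (by omega) h1 (fun m hm1 hm2 => hfalse m (by omega) hm2)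

-- the A loop computes the same value as B's fold, under the marker invariant:
-- markers strictly between i and j are False, markers from j on are True
lemma loopA_eq (arr : List Int) (k : Int) :
    ∀ (fuel : Nat) (nums : List Bool) (i j count : Int),
      ((arr.length : Int) - j).toNat = fuel →
      nums.length = arr.length →
      0 ≤ i → i < j →
      (∀ m : Int, i < m → m < j → PySem.List.pyGet? nums m = some false) →
      (∀ m : Int, j ≤ m → m < (arr.length : Int) → PySem.List.pyGet? nums m = some true) →
      checkLoopA arr k (arr.length : Int) nums i j count =
        ((PySem.List.pyRange j (arr.length : Int) 1).foldl
          (fun s j =>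
            if PySem.List.pyGetD arr j 0 - PySem.List.pyGetD arr s.1 0 < k then (s.1, s.2 + 1)
            else (j, s.2))
          (i, count)).2 := by
  intro fuel
  induction fuel with
  | zero =>
    intro nums i j count hF _ _ _ _ _
    have hnj : (arr.length : Int) ≤ j := by omega
    rw [checkLoopA, PySem.List.pyRange_one_eq_nil hnj]
    simp only [dif_neg (by omega : ¬ j < (arr.length : Int)), List.foldl_nil]
  | succ f ih =>
    intro nums i j count hF hlen hi hij hfalse htrue
    have hjn : j < (arr.length : Int) := by omega
    rw [checkLoopA, PySem.List.pyRange_one_cons hjn]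
    simp only [dif_pos hjn, List.foldl_cons]
    split_ifs with hcond
    · -- close pair: mark j False, count += 1; B keeps last = i
      have hset : PySem.List.pySetD nums j false = nums.set j.toNat false :=
        PySem.List.pySetD_of_nonneg nums false (by omega : (0:Int) ≤ j)
      rw [hset]
      refine ih (nums.set j.toNat false) i (j + 1) (count + 1) (by omega)
        (by simpa using hlen) hi (by omega) ?_ ?_
      · intro m hm1 hm2
        rw [PySem.List.pyGet?_of_nonneg (nums.set j.toNat false) (by omega : (0:Int) ≤ m),
          List.getElem?_set]
        by_cases hmj : m = j
        · subst hmj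
          simp [show m.toNat < nums.length by omega]
        · rw [if_neg (by omega), ← PySem.List.pyGet?_of_nonneg nums (by omega : (0:Int) ≤ m)]
          exact hfalse m hm1 (by omega)
      · intro m hm1 hm2
        rw [PySem.List.pyGet?_of_nonneg (nums.set j.toNat false) (by omega : (0:Int) ≤ m),
          List.getElem?_set, if_neg (by omega),
          ← PySem.List.pyGet?_of_nonneg nums (by omega : (0:Int) ≤ m)]
        exact htrue m (by omega) hm2
    · -- far pair: A advances i through `plus`, landing exactly on j; B sets last = j
      have hpl : plusA i nums (arr.length : Int) = j :=
        plusA_eq nums _ j hjn (htrue j le_rfl hjn) i hij hfalse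
      rw [hpl]
      refine ih nums j (j + 1) count (by omega) hlen (by omega) (by omega)
        (fun m hm1 hm2 => (by omega : False).elim) (fun m hm1 hm2 => htrue m (by omega) hm2)

-- ===== VERDICT (by name: the statement is the Claim_ definition above) =====
theorem check_spec : Claim_equal_check := by
  intro arr k _
  unfold Spec_check check check_alt
  refine loopA_eq arr k ((arr.length : Int) - 1).toNat _ 0 1 0 rfl (by simp)
    le_rfl (by omega) (fun m hm1 hm2 => (by omega : False).elim) ?_
  intro m hm1 hm2
  rw [PySem.List.pyGet?_of_nonneg (List.replicate arr.length true) (by omega : (0:Int) ≤ m)]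
  simp only [List.getElem?_replicate]
  rw [if_pos (by omega)]
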